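-- pv_equiv track=rewrite | github.com/davmorenoga/proyect | pyphi/utils.py | all_states
-- ===== SOURCE A (Python) =====
-- from itertools import chain, combinations, product
--
-- def all_states(n, holi=False):
--     """Return all binary states for a system.
--
--     Args:
--         n (int): The number of elements in the system.
--         holi (bool): Whether to return the states in HOLI order instead of LOLI
--             order.
--
--     Yields:
--         tuple[int]: The next state of an ``n``-element system, in LOLI order
--             unless ``holi`` is ``True``.
--     """
--     if n == 0:
--         return
--
--     for state in product((0, 1), repeat=n):
--         if holi:
--             yield state
--         else:
--             yield state[::-1]  # Convert to LOLI-ordering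
-- ===== SOURCE B (Python) =====
-- def all_states(n, holi=False):
--     """Yield all binary states of an n-element system, decoding each state
--     directly from the bits of an integer counter instead of itertools.product."""
--     if n == 0:
--         return
--     for i in range(2 ** n):
--         if holi:
--             yield tuple((i >> (n - 1 - j)) & 1 for j in range(n))
--         else:
--             yield tuple((i >> j) & 1 for j in range(n))
-- ===== Notes on version B (the rewrite author's own statement) =====
-- stated objective: alternative
-- what changed: Replaces the itertools.product enumeration with a single integer counter over range(2**n), decoding each state tuple directly from the counter's bits (MSB-first for HOLI, LSB-first for LOLI), which also removes the per-state tuple reversal.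
import Mathlib
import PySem

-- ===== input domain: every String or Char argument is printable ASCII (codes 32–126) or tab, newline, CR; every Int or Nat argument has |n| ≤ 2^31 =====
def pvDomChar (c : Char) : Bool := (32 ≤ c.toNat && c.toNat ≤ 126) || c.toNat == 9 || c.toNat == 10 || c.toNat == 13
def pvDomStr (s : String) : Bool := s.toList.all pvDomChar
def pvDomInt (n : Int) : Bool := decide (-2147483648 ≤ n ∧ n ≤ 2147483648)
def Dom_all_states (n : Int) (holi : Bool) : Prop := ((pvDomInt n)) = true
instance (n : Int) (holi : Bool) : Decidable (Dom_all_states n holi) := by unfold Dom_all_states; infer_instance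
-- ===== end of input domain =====

-- B enumerates an integer counter over range(2**n) and decodes each state from
-- its bits, instead of A's itertools.product enumeration with per-state reversal.

-- ===== PORT A =====
-- itertools.product((0,1), repeat=m): first coordinate varies slowest.
def prodA : Nat → List (List Int)
  | 0 => [[]]
  | m + 1 => ([0, 1] : List Int).flatMap (fun x => (prodA m).map (fun rest => x :: rest))

def all_states (n : Int) (holi : Bool) : List (List Int) :=
  if n = 0 then []
  else (prodA n.toNat).map (fun state => if holi then state else state.reverse)

-- ===== PORT B =====
-- tuple((i >> (n-1-j)) & 1 for j in range(n))
def bitsMSB (m : Nat) (i : Nat) : List Int :=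
  (List.range m).map (fun j => ((i >>> (m - 1 - j)) % 2 : Nat))

-- tuple((i >> j) & 1 for j in range(n))
def bitsLSB (m : Nat) (i : Nat) : List Int :=
  (List.range m).map (fun j => ((i >>> j) % 2 : Nat))

def all_states_alt (n : Int) (holi : Bool) : List (List Int) :=
  if n = 0 then []
  else (List.range (2 ^ n.toNat)).map
    (fun i => if holi then bitsMSB n.toNat i else bitsLSB n.toNat i)

-- ===== PRECONDITION & SPEC =====
-- Pre_ excludes n < 0, where A raises ValueError (product(repeat=n) with negative n).
def Pre_all_states (n : Int) (holi : Bool) : Prop := 0 ≤ n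
instance (n : Int) (holi : Bool) : Decidable (Pre_all_states n holi) := by unfold Pre_all_states; infer_instance

def pvWitness_all_states : Int × Bool := (2, false)

def Spec_all_states (n : Int) (holi : Bool) (out : List (List Int)) : Prop := out = all_states_alt n holi
instance (n : Int) (holi : Bool) (out : List (List Int)) : Decidable (Spec_all_states n holi out) := by unfold Spec_all_states; infer_instance

-- ===== CLAIM (what is proved, stated in full; the proofs are below) =====
def Claim_equal_all_states : Prop := ∀ (n : Int) (holi : Bool), Dom_all_states n holi → Pre_all_states n holi → Spec_all_states n holi (all_states n holi)

-- ===== LEMMAS AND PROOFS =====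

theorem bitsMSB_lt (m i : Nat) (hi : i < 2 ^ m) :
    bitsMSB (m + 1) i = 0 :: bitsMSB m i := by
  simp only [bitsMSB, List.range_succ_eq_map, List.map_cons, List.map_map]
  refine List.cons_eq_cons.mpr ⟨?_, ?_⟩
  · have h0 : i >>> (m + 1 - 1 - 0) = 0 := by
      simp [Nat.shiftRight_eq_div_pow, Nat.div_eq_of_lt hi]
    rw [h0]
    simp
  · apply List.map_congr_left
    intro j _
    simp only [Function.comp_apply]
    congr 3
    omega

theorem bitsMSB_ge (m i : Nat) (hi : i < 2 ^ m) :
    bitsMSB (m + 1) (i + 2 ^ m) = 1 :: bitsMSB m i := by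
  simp only [bitsMSB, List.range_succ_eq_map, List.map_cons, List.map_map]
  refine List.cons_eq_cons.mpr ⟨?_, ?_⟩
  · have h1 : (i + 2 ^ m) >>> (m + 1 - 1 - 0) = 1 := by
      simp only [Nat.add_sub_cancel, Nat.sub_zero, Nat.shiftRight_eq_div_pow]
      have hp : 0 < 2 ^ m := Nat.two_pow_pos m
      have h2 : (i + 2 ^ m) / 2 ^ m = i / 2 ^ m + 1 := Nat.add_div_right i hp
      rw [h2, Nat.div_eq_of_lt hi]
    rw [h1]
    simp
  · apply List.map_congr_left
    intro j hj
    simp only [Function.comp_apply]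
    have hjm : j < m := List.mem_range.mp hj
    have hk : m + 1 - 1 - (j + 1) = m - 1 - j := by omega
    rw [hk]
    set k := m - 1 - j with hkdef
    have hkm : k < m := by omega
    have hsplit : (i + 2 ^ m) >>> k = i >>> k + 2 ^ (m - 1 - k) * 2 := by
      simp only [Nat.shiftRight_eq_div_pow]
      have h2 : 2 ^ m = (2 ^ (m - 1 - k) * 2) * 2 ^ k := by
        rw [mul_assoc, ← pow_succ', ← pow_add]
        congr 1
        omega
      rw [h2, Nat.add_mul_div_right _ _ (Nat.two_pow_pos k)]
    rw [hsplit, Nat.add_mul_mod_self_right]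

theorem prodA_eq (m : Nat) : prodA m = (List.range (2 ^ m)).map (bitsMSB m) := by
  induction m with
  | zero => simp [prodA, bitsMSB]
  | succ m ih =>
    rw [show (2:ℕ) ^ (m + 1) = 2 ^ m + 2 ^ m by ring, List.range_add]
    simp only [prodA, List.flatMap_cons, List.flatMap_nil, List.append_nil,
      List.map_append, List.map_map, ih]
    congr 1
    · apply List.map_congr_left
      intro i hi
      simp only [Function.comp_apply]
      exact (bitsMSB_lt m i (List.mem_range.mp hi)).symm
    · apply List.map_congr_left
      intro i hi
      simp only [Function.comp_apply]
      rw [show 2 ^ m + i = i + 2 ^ m by ring]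
      exact (bitsMSB_ge m i (List.mem_range.mp hi)).symm

theorem reverse_map_range (m : Nat) (g : Nat → Int) :
    ((List.range m).map g).reverse = (List.range m).map (fun j => g (m - 1 - j)) := by
  apply List.ext_getElem (by simp)
  intro k h1 h2
  simp only [List.getElem_reverse, List.getElem_map, List.getElem_range,
    List.length_map, List.length_range]

theorem bitsMSB_reverse (m i : Nat) : (bitsMSB m i).reverse = bitsLSB m i := by
  unfold bitsMSB bitsLSB
  rw [reverse_map_range]
  apply List.map_congr_left
  intro j hj
  have hjm := List.mem_range.mp hj
  have he : m - 1 - (m - 1 - j) = j := by omega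
  rw [he]

-- ===== VERDICT (by name: the statement is the Claim_ definition above) =====
theorem all_states_spec : Claim_equal_all_states := by
  intro n holi _ hpre
  unfold Spec_all_states all_states all_states_alt
  by_cases hn : n = 0
  · simp [hn]
  · simp only [if_neg hn]
    rw [prodA_eq, List.map_map]
    apply List.map_congr_left
    intro i _
    cases holi with
    | true => simp
    | false => simp [bitsMSB_reverse]
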